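-- pv_equiv track=rewrite | github.com/BobbyBand/Bit-flip-Attack-BFA- | DeepRecon_Simulation/simulate_deeprecon_vgg_pytorch.py | split_blocks_no_bias
-- ===== SOURCE A (Python) =====
-- from typing import List, Dict, Tuple
--
-- def split_blocks_no_bias(seq: List[str]) -> List[List[str]]:
--     """Split feature-extractor ops by MaxPool (ignore BiasAdd)."""
--     blocks, cur = [], []
--     for op in seq:
--         if op == "BiasAdd":  # ignore for classic block view
--             continue
--         if op == "MaxPool":
--             blocks.append(cur[:]); cur=[]
--         else:
--             cur.append(op)
--     return blocks
-- ===== SOURCE B (Python) =====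
-- def split_blocks_no_bias(seq):
--     """Split feature-extractor ops by MaxPool (ignore BiasAdd)."""
--     filtered = [op for op in seq if op != "BiasAdd"]
--     idxs = [i for i, op in enumerate(filtered) if op == "MaxPool"]
--     blocks = []
--     start = 0
--     for i in idxs:
--         blocks.append(filtered[start:i])
--         start = i + 1
--     return blocks
-- ===== Notes on version B (the rewrite author's own statement) =====
-- stated objective: alternative
-- what changed: B replaces A's single stateful accumulate-and-flush loop by a filter of BiasAdd, an index list of MaxPool positions, and slicing between consecutive MaxPool indices (naturally dropping the tail after the last MaxPool, as A does).
import Mathlib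
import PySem

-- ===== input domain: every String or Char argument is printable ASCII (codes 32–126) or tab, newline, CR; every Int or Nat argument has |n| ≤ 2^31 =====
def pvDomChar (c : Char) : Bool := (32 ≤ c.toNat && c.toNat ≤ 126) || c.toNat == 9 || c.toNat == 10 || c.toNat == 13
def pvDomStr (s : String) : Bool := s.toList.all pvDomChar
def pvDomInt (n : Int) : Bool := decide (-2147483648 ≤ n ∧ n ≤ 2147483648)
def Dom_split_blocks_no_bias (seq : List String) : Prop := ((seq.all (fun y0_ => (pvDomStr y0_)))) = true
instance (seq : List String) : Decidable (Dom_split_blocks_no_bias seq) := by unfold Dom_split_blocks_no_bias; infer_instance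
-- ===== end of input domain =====

-- B replaces A's stateful accumulate-and-flush loop by filter + MaxPool index list + slicing between indices (alternative decomposition, same O(n) cost).


-- ===== PORT A =====
def split_blocks_no_bias (seq : List String) : List (List String) :=
  (seq.foldl
    (fun (st : List (List String) × List String) op =>
      if op == "BiasAdd" then st
      else if op == "MaxPool" then (st.1 ++ [st.2], [])
      else (st.1, st.2 ++ [op]))
    ([], [])).1

-- ===== PORT B =====
def split_blocks_no_bias_alt (seq : List String) : List (List String) :=
  let filtered := seq.filter (fun op => !(op == "BiasAdd"))
  let idxs := (PySem.List.enumerate filtered).filterMap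
    (fun p => if p.2 == "MaxPool" then some p.1 else none)
  (idxs.foldl
    (fun (st : List (List String) × Int) i =>
      (st.1 ++ [PySem.List.slice filtered (some st.2) (some i)], i + 1))
    ([], 0)).1

-- ===== PRECONDITION & SPEC =====
def Spec_split_blocks_no_bias (seq : List String) (out : List (List String)) : Prop := out = split_blocks_no_bias_alt seq
instance (seq : List String) (out : List (List String)) : Decidable (Spec_split_blocks_no_bias seq out) := by unfold Spec_split_blocks_no_bias; infer_instance

-- ===== CLAIM (what is proved, stated in full; the proofs are below) =====
def Claim_equal_split_blocks_no_bias : Prop := ∀ (seq : List String), Dom_split_blocks_no_bias seq → Spec_split_blocks_no_bias seq (split_blocks_no_bias seq)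

-- ===== LEMMAS AND PROOFS =====

-- A's loop step, on the BiasAdd-free stream.
def pvAStep (st : List (List String) × List String) (op : String) : List (List String) × List String :=
  if op == "MaxPool" then (st.1 ++ [st.2], []) else (st.1, st.2 ++ [op])

-- B's loop step over the MaxPool index list of a fixed list `l`.
def pvBStep (l : List String) (st : List (List String) × Int) (i : Int) : List (List String) × Int :=
  (st.1 ++ [PySem.List.slice l (some st.2) (some i)], i + 1)

theorem pvBStep_apply (l : List String) (st : List (List String) × Int) (i : Int) :
    pvBStep l st i = (st.1 ++ [PySem.List.slice l (some st.2) (some i)], i + 1) := rfl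

theorem pvAStep_maxpool (st : List (List String) × List String) :
    pvAStep st "MaxPool" = (st.1 ++ [st.2], []) := by simp [pvAStep]

theorem pvAStep_other (st : List (List String) × List String) (op : String)
    (h : (op == "MaxPool") = false) : pvAStep st op = (st.1, st.2 ++ [op]) := by
  simp [pvAStep, h]

def pvIdxs (l : List String) : List Int :=
  (PySem.List.enumerate l).filterMap (fun p => if p.2 == "MaxPool" then some p.1 else none)

theorem pvMem_idxs (l : List String) (i : Int) (h : i ∈ pvIdxs l) :
    0 ≤ i ∧ i.toNat < l.length := by
  unfold pvIdxs at h
  rcases List.mem_filterMap.mp h with ⟨p, hp, hpi⟩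
  rcases (PySem.List.mem_enumerate_iff l 0 p).mp hp with ⟨k, hk, rfl⟩
  split at hpi
  · cases hpi; simp; omega
  · cases hpi

theorem pvSliceAux {α : Type} (l : List α) (x : α) (a b : Nat) (hb : b ≤ l.length) :
    ((l ++ [x]).drop a).take (b - a) = (l.drop a).take (b - a) := by
  by_cases ha : a ≤ l.length
  · rw [List.drop_append_of_le_length ha, List.take_append_of_le_length (by simp; omega)]
  · have : b - a = 0 := by omega
    simp [this]

-- extending the underlying list past all indices does not change B's fold
theorem pvFold_ext (l : List String) (x : String) (idxs : List Int)
    (h : ∀ i ∈ idxs, 0 ≤ i ∧ i.toNat < l.length)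
    (acc : List (List String) × Int) (hs : 0 ≤ acc.2) :
    idxs.foldl (pvBStep (l ++ [x])) acc = idxs.foldl (pvBStep l) acc := by
  induction idxs generalizing acc with
  | nil => rfl
  | cons i t ih =>
    have hi := h i (by simp)
    have hstep : pvBStep (l ++ [x]) acc i = pvBStep l acc i := by
      rw [pvBStep_apply, pvBStep_apply]
      rw [PySem.List.slice_toNat _ hs hi.1, PySem.List.slice_toNat _ hs hi.1,
        pvSliceAux l x acc.2.toNat i.toNat (by omega)]
    simp only [List.foldl_cons, hstep]
    exact ih (fun j hj => h j (by simp [hj])) _ (by rw [pvBStep_apply]; simp; omega)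

theorem pvIdxs_append (l : List String) (x : String) :
    pvIdxs (l ++ [x]) = pvIdxs l ++ (if x == "MaxPool" then [(l.length : Int)] else []) := by
  unfold pvIdxs
  rw [PySem.List.enumerate_append, List.filterMap_append]
  simp [PySem.List.enumerate]
  by_cases hx : x = "MaxPool" <;> simp [hx]

-- main invariant: B's fold produces A's blocks, and its cursor points at A's current tail
theorem pvMain (l : List String) :
    ((pvIdxs l).foldl (pvBStep l) ([], 0)).1 = (l.foldl pvAStep ([], [])).1 ∧
    l.drop ((pvIdxs l).foldl (pvBStep l) ([], 0)).2.toNat = (l.foldl pvAStep ([], [])).2 ∧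
    0 ≤ ((pvIdxs l).foldl (pvBStep l) ([], 0)).2 ∧
    ((pvIdxs l).foldl (pvBStep l) ([], 0)).2.toNat ≤ l.length := by
  induction l using List.reverseRecOn with
  | nil => simp [pvIdxs, PySem.List.enumerate]
  | append_singleton l x ih =>
    obtain ⟨ih1, ih2, ih3, ih4⟩ := ih
    have hext := pvFold_ext l x (pvIdxs l) (pvMem_idxs l) ([], 0) (by simp)
    have hA : (l ++ [x]).foldl pvAStep ([], [])
        = pvAStep (l.foldl pvAStep ([], [])) x := by
      rw [List.foldl_append]; rfl
    have hBfold : (pvIdxs (l ++ [x])).foldl (pvBStep (l ++ [x])) ([], 0)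
        = (if x == "MaxPool" then [(l.length : Int)] else []).foldl
            (pvBStep (l ++ [x])) ((pvIdxs l).foldl (pvBStep l) ([], 0)) := by
      rw [pvIdxs_append, List.foldl_append, hext]
    by_cases hx : x = "MaxPool"
    · subst hx
      have hslice : PySem.List.slice (l ++ ["MaxPool"])
          (some ((pvIdxs l).foldl (pvBStep l) ([], 0)).2) (some (l.length : Int))
          = l.drop ((pvIdxs l).foldl (pvBStep l) ([], 0)).2.toNat := by
        rw [PySem.List.slice_toNat _ ih3 (Int.natCast_nonneg _), Int.toNat_natCast,
          pvSliceAux l "MaxPool" _ l.length le_rfl]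
        have hlen : l.length - ((pvIdxs l).foldl (pvBStep l) ([], 0)).2.toNat
            = (l.drop ((pvIdxs l).foldl (pvBStep l) ([], 0)).2.toNat).length := by simp
        rw [hlen, List.take_length]
      have hB2 : (pvIdxs (l ++ ["MaxPool"])).foldl (pvBStep (l ++ ["MaxPool"])) ([], 0)
          = (((pvIdxs l).foldl (pvBStep l) ([], 0)).1
              ++ [l.drop ((pvIdxs l).foldl (pvBStep l) ([], 0)).2.toNat],
             (l.length : Int) + 1) := by
        rw [hBfold]
        simp only [beq_self_eq_true, if_true, List.foldl_cons, List.foldl_nil]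
        rw [pvBStep_apply, hslice]
      rw [hB2, hA, pvAStep_maxpool]
      refine ⟨by rw [ih1, ih2], ?_, by omega, by simp⟩
      apply List.drop_eq_nil_of_le
      simp
    · have hbx : (x == "MaxPool") = false := by simp [hx]
      have hB2 : (pvIdxs (l ++ [x])).foldl (pvBStep (l ++ [x])) ([], 0)
          = (pvIdxs l).foldl (pvBStep l) ([], 0) := by
        rw [hBfold, hbx]; rfl
      rw [hB2, hA, pvAStep_other _ _ hbx]
      refine ⟨ih1, ?_, ih3, by simpa using Nat.le_succ_of_le ih4⟩
      rw [List.drop_append_of_le_length ih4, ih2]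

theorem pvA_eq (seq : List String) :
    split_blocks_no_bias seq
      = ((seq.filter (fun op => !(op == "BiasAdd"))).foldl pvAStep ([], [])).1 := by
  unfold split_blocks_no_bias
  rw [List.foldl_filter]
  congr 1
  congr 1
  funext st op
  unfold pvAStep
  by_cases h : op = "BiasAdd" <;> simp [h]

-- ===== VERDICT (by name: the statement is the Claim_ definition above) =====
theorem split_blocks_no_bias_spec : Claim_equal_split_blocks_no_bias := by
  intro seq _
  unfold Spec_split_blocks_no_bias
  rw [pvA_eq]
  show _ = ((pvIdxs _).foldl (pvBStep _) ([], 0)).1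
  exact ((pvMain (seq.filter (fun op => !(op == "BiasAdd")))).1).symm
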